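-- pv_equiv track=rewrite | github.com/cellinlab/cell-skills | scripts/check-skill-doc-boundaries.py | strip_fenced_code_blocks
-- ===== SOURCE A (Python) =====
-- def strip_fenced_code_blocks(text: str, suffix: str) -> str:
--     if suffix != ".md":
--         return text
--
--     lines = text.splitlines()
--     cleaned: list[str] = []
--     in_fence = False
--
--     for line in lines:
--         stripped = line.lstrip()
--         if stripped.startswith("```") or stripped.startswith("~~~"):
--             in_fence = not in_fence
--             cleaned.append("")
--             continue
--         if in_fence:
--             cleaned.append("")
--             continue
--         cleaned.append(line)
--
--     return "\n".join(cleaned)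
-- ===== SOURCE B (Python) =====
-- def _is_fence(line: str) -> bool:
--     s = line.lstrip()
--     return s.startswith("```") or s.startswith("~~~")
--
--
-- def strip_fenced_code_blocks(text: str, suffix: str) -> str:
--     if suffix != ".md":
--         return text
--     lines = text.splitlines()
--     fences = [_is_fence(line) for line in lines]
--     # a line is blanked iff it is a fence marker, or an odd number of
--     # fence markers precede it (i.e. it lies inside an open fence)
--     return "\n".join(
--         "" if _is_fence(line) or fences[:i].count(True) % 2 == 1 else line
--         for i, line in enumerate(lines)
--     )
-- ===== Notes on version B (the rewrite author's own statement) =====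
-- stated objective: alternative
-- what changed: Replaces A's single pass with a toggled in_fence flag by a stateless per-line closed form: a line is blanked iff it is a fence marker or an odd number of fence markers precede it; trades the O(n) stateful loop for an O(n^2) but state-free characterization.
import Mathlib
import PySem

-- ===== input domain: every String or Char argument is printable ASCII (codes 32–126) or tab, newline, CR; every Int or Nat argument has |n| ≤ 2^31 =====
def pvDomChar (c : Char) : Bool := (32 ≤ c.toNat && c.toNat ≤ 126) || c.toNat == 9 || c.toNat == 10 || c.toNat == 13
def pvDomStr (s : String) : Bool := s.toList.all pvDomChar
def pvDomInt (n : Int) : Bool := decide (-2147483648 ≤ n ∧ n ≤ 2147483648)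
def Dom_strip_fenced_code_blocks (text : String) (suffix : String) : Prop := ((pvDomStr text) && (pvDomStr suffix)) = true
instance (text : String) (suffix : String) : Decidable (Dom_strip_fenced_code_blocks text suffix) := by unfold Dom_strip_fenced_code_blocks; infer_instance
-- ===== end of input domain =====

-- B replaces A's toggled in_fence flag by a per-line closed form (fence line, or odd number of
-- preceding fence lines ⇒ blank); a genuinely different, state-free decomposition of the same task.


-- ===== PORT A =====
-- A's for-loop with the toggling in_fence flag, as structural recursion over the lines
def pvALoop : List String → Bool → List String
  | [], _ => []
  | line :: rest, inFence =>
    let stripped := PySem.Str.lstrip line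
    if PySem.Str.startswith stripped "```" || PySem.Str.startswith stripped "~~~" then
      "" :: pvALoop rest (!inFence)
    else if inFence then
      "" :: pvALoop rest inFence
    else
      line :: pvALoop rest inFence

def strip_fenced_code_blocks (text : String) (suffix : String) : String :=
  if suffix ≠ ".md" then text
  else PySem.Str.join "\n" (pvALoop (PySem.Str.splitlines text) false)

-- ===== PORT B =====
-- B's _is_fence helper
def pvIsFence (line : String) : Bool :=
  let s := PySem.Str.lstrip line
  PySem.Str.startswith s "```" || PySem.Str.startswith s "~~~"

-- B: fences[:i].count(True) is PySem.List.count (slice fences none i) true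
def strip_fenced_code_blocks_alt (text : String) (suffix : String) : String :=
  if suffix ≠ ".md" then text
  else
    let lines := PySem.Str.splitlines text
    let fences := lines.map pvIsFence
    PySem.Str.join "\n" ((PySem.List.enumerate lines 0).map (fun p =>
      if pvIsFence p.2 || (PySem.List.count (PySem.List.slice fences none (some p.1)) true) % 2 == 1
      then "" else p.2))

-- ===== PRECONDITION & SPEC =====
def Spec_strip_fenced_code_blocks (text : String) (suffix : String) (out : String) : Prop := out = strip_fenced_code_blocks_alt text suffix
instance (text : String) (suffix : String) (out : String) : Decidable (Spec_strip_fenced_code_blocks text suffix out) := by unfold Spec_strip_fenced_code_blocks; infer_instance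

-- ===== CLAIM (what is proved, stated in full; the proofs are below) =====
def Claim_equal_strip_fenced_code_blocks : Prop := ∀ (text : String) (suffix : String), Dom_strip_fenced_code_blocks text suffix → Spec_strip_fenced_code_blocks text suffix (strip_fenced_code_blocks text suffix)

-- ===== LEMMAS AND PROOFS =====

lemma pv_enumerate_shift {α : Type} (xs : List α) (s : Int) :
    PySem.List.enumerate xs (s + 1) = (PySem.List.enumerate xs s).map (fun p => (p.1 + 1, p.2)) := by
  induction xs generalizing s with
  | nil => simp [PySem.List.enumerate_nil]
  | cons x rest ih =>
    simp [PySem.List.enumerate_cons, ih]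

lemma pv_parity_succ (n : Nat) : ((n + 1) % 2 == 1) = !(n % 2 == 1) := by
  rcases Nat.mod_two_eq_zero_or_one n with h | h <;> simp [Nat.add_mod, h]

-- loop invariant: A's flag equals the parity of fence lines already seen
lemma pvALoop_eq (ls : List String) (b : Bool) :
    pvALoop ls b = (PySem.List.enumerate ls 0).map (fun p =>
      if pvIsFence p.2 || (b ^^ (((ls.map pvIsFence).take p.1.toNat).count true % 2 == 1))
      then "" else p.2) := by
  induction ls generalizing b with
  | nil => simp [pvALoop, PySem.List.enumerate_nil]
  | cons l rest ih =>
    rw [PySem.List.enumerate_cons, List.map_cons]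
    rw [pv_enumerate_shift rest 0, List.map_map]
    have htail : ∀ (b' : Bool),
        (PySem.List.enumerate rest 0).map
          ((fun p : Int × String =>
            if pvIsFence p.2 || (b' ^^ ((((l :: rest).map pvIsFence).take p.1.toNat).count true % 2 == 1))
            then "" else p.2) ∘ (fun p : Int × String => (p.1 + 1, p.2)))
        = (PySem.List.enumerate rest 0).map (fun p =>
            if pvIsFence p.2 || ((b' ^^ (pvIsFence l)) ^^ (((rest.map pvIsFence).take p.1.toNat).count true % 2 == 1))
            then "" else p.2) := by
      intro b'
      apply List.map_congr_left
      intro p hp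
      rcases (PySem.List.mem_enumerate_iff _ _ _).1 hp with ⟨k, hk, rfl⟩
      simp only [Function.comp]
      have h1 : ((0 : Int) + k + 1).toNat = k + 1 := by omega
      have h0 : ((0 : Int) + k).toNat = k := by omega
      rw [h1, h0, List.map_cons, List.take_succ_cons]
      cases hf : pvIsFence l
      · simp
      · simp [pv_parity_succ]
    show pvALoop (l :: rest) b = _
    rw [pvALoop]
    cases hf : pvIsFence l
    · have hf' : (PySem.Str.startswith (PySem.Str.lstrip l) "```" || PySem.Str.startswith (PySem.Str.lstrip l) "~~~") = false := by
        simpa [pvIsFence] using hf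
      rw [hf']
      simp only [Bool.false_eq_true, if_false]
      cases b
      · simp only [Bool.false_eq_true, if_false]
        rw [ih false, htail false]
        simp [hf]
      · simp only [if_true]
        rw [ih true, htail true]
        simp [hf]
    · have hf' : (PySem.Str.startswith (PySem.Str.lstrip l) "```" || PySem.Str.startswith (PySem.Str.lstrip l) "~~~") = true := by
        simpa [pvIsFence] using hf
      rw [hf']
      simp only [if_true]
      rw [ih (!b), htail b]
      simp [hf]

-- B's slice fences[:i] is a take (indices from enumerate are the naturals)
lemma pv_alt_slice_eq (lines : List String) :
    (PySem.List.enumerate lines 0).map (fun p =>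
      if pvIsFence p.2 || (PySem.List.count (PySem.List.slice (lines.map pvIsFence) none (some p.1)) true) % 2 == 1
      then "" else p.2)
    = (PySem.List.enumerate lines 0).map (fun p =>
      if pvIsFence p.2 || (false ^^ (((lines.map pvIsFence).take p.1.toNat).count true % 2 == 1))
      then "" else p.2) := by
  apply List.map_congr_left
  intro p hp
  rcases (PySem.List.mem_enumerate_iff _ _ _).1 hp with ⟨k, hk, rfl⟩
  have h0 : ((0 : Int) + k) = (k : Int) := by omega
  simp only [h0, PySem.List.slice_to_natCast, PySem.List.count_eq, Int.toNat_natCast, Bool.false_xor]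

-- ===== VERDICT (by name: the statement is the Claim_ definition above) =====
theorem strip_fenced_code_blocks_spec : Claim_equal_strip_fenced_code_blocks := by
  intro text suffix _
  unfold Spec_strip_fenced_code_blocks strip_fenced_code_blocks strip_fenced_code_blocks_alt
  by_cases h : suffix ≠ ".md"
  · simp [h]
  · simp only [h, if_false]
    rw [pv_alt_slice_eq, pvALoop_eq]
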